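-- pv_equiv track=rewrite | github.com/wexcomm/hp-tuners-ai-agent | skills/hpt_converter/comparator.py | _identify_memory_region
-- ===== SOURCE A (Python) =====
-- def _identify_memory_region(offset: int) -> str:
--     """Try to identify what memory region an offset belongs to"""
--     # GM E37 memory map (simplified)
--     regions = [
--         (0x00000, 0x10000, "Boot/Reserved"),
--         (0x10000, 0x20000, "Calibration Header"),
--         (0x20000, 0x50000, "Engine Tables"),
--         (0x50000, 0x60000, "Transmission Tables"),
--         (0x60000, 0x70000, "Fuel Tables"),
--         (0x70000, 0x80000, "Spark Tables"),
--         (0x80000, 0x90000, "Torque Model"),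
--         (0x90000, 0xA0000, "VE/MAF Tables"),
--         (0xA0000, 0xF0000, "System/Diagnostics"),
--     ]
--
--     for start, end, name in regions:
--         if start <= offset < end:
--             return name
--
--     return "Unknown"
-- ===== SOURCE B (Python) =====
-- import bisect
--
-- _STARTS = [0x00000, 0x10000, 0x20000, 0x50000, 0x60000,
--            0x70000, 0x80000, 0x90000, 0xA0000]
-- _NAMES = ["Boot/Reserved", "Calibration Header", "Engine Tables",
--           "Transmission Tables", "Fuel Tables", "Spark Tables",
--           "Torque Model", "VE/MAF Tables", "System/Diagnostics"]
-- _END = 0xF0000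
--
--
-- def _identify_memory_region(offset: int) -> str:
--     """Try to identify what memory region an offset belongs to"""
--     i = bisect.bisect_right(_STARTS, offset) - 1
--     if i < 0 or offset >= _END:
--         return "Unknown"
--     return _NAMES[i]
-- ===== Notes on version B (the rewrite author's own statement) =====
-- stated objective: idiomatic
-- what changed: Replaces the sequential scan over (start,end,name) range triples with a binary search (bisect_right) into a sorted start-boundary array plus a parallel name array, with explicit below-range and past-end guards.
import Mathlib
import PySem

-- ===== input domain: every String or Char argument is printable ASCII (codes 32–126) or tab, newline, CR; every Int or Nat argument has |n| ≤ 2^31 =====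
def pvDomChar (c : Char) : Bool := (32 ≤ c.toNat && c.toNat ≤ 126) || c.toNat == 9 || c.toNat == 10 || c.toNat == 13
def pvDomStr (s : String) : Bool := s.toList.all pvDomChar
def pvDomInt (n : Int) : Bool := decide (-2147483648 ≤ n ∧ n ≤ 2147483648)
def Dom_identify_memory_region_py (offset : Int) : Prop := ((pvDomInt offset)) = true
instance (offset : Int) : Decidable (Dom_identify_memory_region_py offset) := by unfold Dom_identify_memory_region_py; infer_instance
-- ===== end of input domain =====

-- B replaces A's sequential scan of (start,end,name) range triples with a bisect_right
-- binary search into a sorted start-boundary array plus a parallel name array (idiomatic).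


-- ===== PORT A =====
def pvRegions : List (Int × Int × String) :=
  [(0x00000, 0x10000, "Boot/Reserved"),
   (0x10000, 0x20000, "Calibration Header"),
   (0x20000, 0x50000, "Engine Tables"),
   (0x50000, 0x60000, "Transmission Tables"),
   (0x60000, 0x70000, "Fuel Tables"),
   (0x70000, 0x80000, "Spark Tables"),
   (0x80000, 0x90000, "Torque Model"),
   (0x90000, 0xA0000, "VE/MAF Tables"),
   (0xA0000, 0xF0000, "System/Diagnostics")]

-- the 'for start, end, name in regions' loop: first matching range wins, else "Unknown"
def pvRegionLoop (offset : Int) : List (Int × Int × String) → String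
  | [] => "Unknown"
  | (s, e, n) :: rest => if s ≤ offset ∧ offset < e then n else pvRegionLoop offset rest

def identify_memory_region_py (offset : Int) : String :=
  pvRegionLoop offset pvRegions

-- ===== PORT B =====
def pvStarts : List Int :=
  [0x00000, 0x10000, 0x20000, 0x50000, 0x60000, 0x70000, 0x80000, 0x90000, 0xA0000]

def pvNames : List String :=
  ["Boot/Reserved", "Calibration Header", "Engine Tables", "Transmission Tables",
   "Fuel Tables", "Spark Tables", "Torque Model", "VE/MAF Tables", "System/Diagnostics"]

def identify_memory_region_py_alt (offset : Int) : String :=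
  let i : Int := (PySem.List.bisectRight pvStarts offset : Int) - 1
  if i < 0 ∨ 0xF0000 ≤ offset then "Unknown"
  else (PySem.List.pyGet? pvNames i).getD "Unknown"  -- none branch unreachable: 0 ≤ i ≤ 8

-- ===== PRECONDITION & SPEC =====
def Spec_identify_memory_region_py (offset : Int) (out : String) : Prop := out = identify_memory_region_py_alt offset
instance (offset : Int) (out : String) : Decidable (Spec_identify_memory_region_py offset out) := by unfold Spec_identify_memory_region_py; infer_instance

-- ===== CLAIM (what is proved, stated in full; the proofs are below) =====
def Claim_equal_identify_memory_region_py : Prop := ∀ (offset : Int), Dom_identify_memory_region_py offset → Spec_identify_memory_region_py offset (identify_memory_region_py offset)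

-- ===== LEMMAS AND PROOFS =====

-- value of bisect_right on the concrete start list, characterised by the two
-- neighbouring boundaries
theorem pv_bisect_starts_eq (o : Int) (k : Nat) (hk : k ≤ 9)
    (hlo : 0 < k → pvStarts[k - 1]! ≤ o)
    (hhi : k < 9 → o < pvStarts[k]!) :
    PySem.List.bisectRight pvStarts o = k := by
  obtain ⟨h1, h2, h3⟩ := PySem.List.bisectRight_spec pvStarts o (by decide)
  have hlen : pvStarts.length = 9 := rfl
  set r := PySem.List.bisectRight pvStarts o with hr
  by_contra hne
  rcases Nat.lt_or_ge r k with hlt | hge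
  · have h0 : 0 < k := by omega
    have hj : k - 1 < pvStarts.length := by omega
    have := h3 (k - 1) hj (by omega)
    have hg : pvStarts[k - 1]! = pvStarts[k - 1]'hj := by
      simp [List.getElem!_eq_getElem?_getD, List.getElem?_eq_getElem hj]
    exact absurd (hlo h0) (not_le.mpr (hg ▸ this))
  · have hk9 : k < 9 := by omega
    have hj : k < pvStarts.length := by omega
    have := h2 k hj (by omega)
    have hg : pvStarts[k]! = pvStarts[k]'hj := by
      simp [List.getElem!_eq_getElem?_getD, List.getElem?_eq_getElem hj]
    exact absurd (hhi hk9) (not_lt.mpr (hg ▸ this))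

theorem pv_slice_0 (o : Int) (hhi : o < 0) :
    identify_memory_region_py o = identify_memory_region_py_alt o := by
  have hb : PySem.List.bisectRight pvStarts o = 0 :=
    pv_bisect_starts_eq o 0 (by omega) (by omega) (by intro _; simpa [pvStarts] using hhi)
  unfold identify_memory_region_py identify_memory_region_py_alt
  rw [hb]
  simp only [pvRegionLoop, pvRegions]
  norm_num [PySem.List.pyGet?, PySem.List.pyIdx?, pvNames]
  split_ifs <;> first | rfl | omega

theorem pv_slice_1 (o : Int) (hlo : (0:Int) ≤ o) (hhi : o < 65536) :
    identify_memory_region_py o = identify_memory_region_py_alt o := by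
  have hb : PySem.List.bisectRight pvStarts o = 1 :=
    pv_bisect_starts_eq o 1 (by omega) (by intro _; simpa [pvStarts] using hlo) (by intro _; simpa [pvStarts] using hhi)
  unfold identify_memory_region_py identify_memory_region_py_alt
  rw [hb]
  simp only [pvRegionLoop, pvRegions]
  norm_num [PySem.List.pyGet?, PySem.List.pyIdx?, pvNames]
  split_ifs <;> first | rfl | omega

theorem pv_slice_2 (o : Int) (hlo : (65536:Int) ≤ o) (hhi : o < 131072) :
    identify_memory_region_py o = identify_memory_region_py_alt o := by
  have hb : PySem.List.bisectRight pvStarts o = 2 :=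
    pv_bisect_starts_eq o 2 (by omega) (by intro _; simpa [pvStarts] using hlo) (by intro _; simpa [pvStarts] using hhi)
  unfold identify_memory_region_py identify_memory_region_py_alt
  rw [hb]
  simp only [pvRegionLoop, pvRegions]
  norm_num [PySem.List.pyGet?, PySem.List.pyIdx?, pvNames]
  split_ifs <;> first | rfl | omega

theorem pv_slice_3 (o : Int) (hlo : (131072:Int) ≤ o) (hhi : o < 327680) :
    identify_memory_region_py o = identify_memory_region_py_alt o := by
  have hb : PySem.List.bisectRight pvStarts o = 3 :=
    pv_bisect_starts_eq o 3 (by omega) (by intro _; simpa [pvStarts] using hlo) (by intro _; simpa [pvStarts] using hhi)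
  unfold identify_memory_region_py identify_memory_region_py_alt
  rw [hb]
  simp only [pvRegionLoop, pvRegions]
  norm_num [PySem.List.pyGet?, PySem.List.pyIdx?, pvNames]
  split_ifs <;> first | rfl | omega

theorem pv_slice_4 (o : Int) (hlo : (327680:Int) ≤ o) (hhi : o < 393216) :
    identify_memory_region_py o = identify_memory_region_py_alt o := by
  have hb : PySem.List.bisectRight pvStarts o = 4 :=
    pv_bisect_starts_eq o 4 (by omega) (by intro _; simpa [pvStarts] using hlo) (by intro _; simpa [pvStarts] using hhi)
  unfold identify_memory_region_py identify_memory_region_py_alt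
  rw [hb]
  simp only [pvRegionLoop, pvRegions]
  norm_num [PySem.List.pyGet?, PySem.List.pyIdx?, pvNames]
  split_ifs <;> first | rfl | omega

theorem pv_slice_5 (o : Int) (hlo : (393216:Int) ≤ o) (hhi : o < 458752) :
    identify_memory_region_py o = identify_memory_region_py_alt o := by
  have hb : PySem.List.bisectRight pvStarts o = 5 :=
    pv_bisect_starts_eq o 5 (by omega) (by intro _; simpa [pvStarts] using hlo) (by intro _; simpa [pvStarts] using hhi)
  unfold identify_memory_region_py identify_memory_region_py_alt
  rw [hb]
  simp only [pvRegionLoop, pvRegions]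
  norm_num [PySem.List.pyGet?, PySem.List.pyIdx?, pvNames]
  split_ifs <;> first | rfl | omega

theorem pv_slice_6 (o : Int) (hlo : (458752:Int) ≤ o) (hhi : o < 524288) :
    identify_memory_region_py o = identify_memory_region_py_alt o := by
  have hb : PySem.List.bisectRight pvStarts o = 6 :=
    pv_bisect_starts_eq o 6 (by omega) (by intro _; simpa [pvStarts] using hlo) (by intro _; simpa [pvStarts] using hhi)
  unfold identify_memory_region_py identify_memory_region_py_alt
  rw [hb]
  simp only [pvRegionLoop, pvRegions]
  norm_num [PySem.List.pyGet?, PySem.List.pyIdx?, pvNames]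
  split_ifs <;> first | rfl | omega

theorem pv_slice_7 (o : Int) (hlo : (524288:Int) ≤ o) (hhi : o < 589824) :
    identify_memory_region_py o = identify_memory_region_py_alt o := by
  have hb : PySem.List.bisectRight pvStarts o = 7 :=
    pv_bisect_starts_eq o 7 (by omega) (by intro _; simpa [pvStarts] using hlo) (by intro _; simpa [pvStarts] using hhi)
  unfold identify_memory_region_py identify_memory_region_py_alt
  rw [hb]
  simp only [pvRegionLoop, pvRegions]
  norm_num [PySem.List.pyGet?, PySem.List.pyIdx?, pvNames]
  split_ifs <;> first | rfl | omega

theorem pv_slice_8 (o : Int) (hlo : (589824:Int) ≤ o) (hhi : o < 655360) :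
    identify_memory_region_py o = identify_memory_region_py_alt o := by
  have hb : PySem.List.bisectRight pvStarts o = 8 :=
    pv_bisect_starts_eq o 8 (by omega) (by intro _; simpa [pvStarts] using hlo) (by intro _; simpa [pvStarts] using hhi)
  unfold identify_memory_region_py identify_memory_region_py_alt
  rw [hb]
  simp only [pvRegionLoop, pvRegions]
  norm_num [PySem.List.pyGet?, PySem.List.pyIdx?, pvNames]
  split_ifs <;> first | rfl | omega

theorem pv_slice_9 (o : Int) (hlo : (655360:Int) ≤ o) (hhi : o < 983040) :
    identify_memory_region_py o = identify_memory_region_py_alt o := by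
  have hb : PySem.List.bisectRight pvStarts o = 9 :=
    pv_bisect_starts_eq o 9 (by omega) (by intro _; simpa [pvStarts] using hlo) (by omega)
  unfold identify_memory_region_py identify_memory_region_py_alt
  rw [hb]
  simp only [pvRegionLoop, pvRegions]
  norm_num [PySem.List.pyGet?, PySem.List.pyIdx?, pvNames]
  split_ifs <;> first | rfl | omega

theorem pv_slice_10 (o : Int) (hlo : (983040:Int) ≤ o) :
    identify_memory_region_py o = identify_memory_region_py_alt o := by
  have hb : PySem.List.bisectRight pvStarts o = 9 :=
    pv_bisect_starts_eq o 9 (by omega) (by intro _; simp [pvStarts]; omega) (by omega)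
  unfold identify_memory_region_py identify_memory_region_py_alt
  rw [hb]
  simp only [pvRegionLoop, pvRegions]
  norm_num [PySem.List.pyGet?, PySem.List.pyIdx?, pvNames]
  split_ifs <;> first | rfl | omega

-- ===== VERDICT (by name: the statement is the Claim_ definition above) =====
theorem identify_memory_region_py_spec : Claim_equal_identify_memory_region_py := by
  intro o _
  unfold Spec_identify_memory_region_py
  rcases Int.lt_or_le o 0 with h0 | h0
  · exact pv_slice_0 o h0
  rcases Int.lt_or_le o 65536 with h1 | h1
  · exact pv_slice_1 o h0 h1
  rcases Int.lt_or_le o 131072 with h2 | h2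
  · exact pv_slice_2 o h1 h2
  rcases Int.lt_or_le o 327680 with h3 | h3
  · exact pv_slice_3 o h2 h3
  rcases Int.lt_or_le o 393216 with h4 | h4
  · exact pv_slice_4 o h3 h4
  rcases Int.lt_or_le o 458752 with h5 | h5
  · exact pv_slice_5 o h4 h5
  rcases Int.lt_or_le o 524288 with h6 | h6
  · exact pv_slice_6 o h5 h6
  rcases Int.lt_or_le o 589824 with h7 | h7
  · exact pv_slice_7 o h6 h7
  rcases Int.lt_or_le o 655360 with h8 | h8
  · exact pv_slice_8 o h7 h8
  rcases Int.lt_or_le o 983040 with h9 | h9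
  · exact pv_slice_9 o h8 h9
  exact pv_slice_10 o h9
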